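-- pv_equiv track=rewrite | github.com/kiharalab/EQAFold_public | dataset/dataset.py | T_to_Q_aligned_matrix
-- ===== SOURCE A (Python) =====
-- def T_to_Q_aligned_matrix(empty_query_mtx, template_mtx, query_2_template_idx):
--     query_mtx = empty_query_mtx
--     for i in range(len(query_mtx)):
--         for j in range(len(query_mtx[0])):
--             query_row_idx = i
--             query_col_idx = j
--             if query_row_idx in query_2_template_idx and query_col_idx in query_2_template_idx:
--                 template_row_idx = query_2_template_idx[query_row_idx]
--                 template_col_idx = query_2_template_idx[query_col_idx]
--                 query_mtx[query_row_idx][query_col_idx] = template_mtx[template_row_idx][template_col_idx]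
--     return query_mtx
-- ===== SOURCE B (Python) =====
-- def T_to_Q_aligned_matrix(empty_query_mtx, template_mtx, query_2_template_idx):
--     # Same in-place update of empty_query_mtx as the original; returns it.
--     query_mtx = empty_query_mtx
--     if not query_mtx:
--         return query_mtx
--     nrows = len(query_mtx)
--     ncols = len(query_mtx[0])
--     row_keys = [(q, t) for q, t in query_2_template_idx.items() if 0 <= q < nrows]
--     col_keys = [(q, t) for q, t in query_2_template_idx.items() if 0 <= q < ncols]
--     for qi, ti in row_keys:
--         row = query_mtx[qi]
--         for qj, tj in col_keys:
--             row[qj] = template_mtx[ti][tj]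
--     return query_mtx
-- ===== Notes on version B (the rewrite author's own statement) =====
-- stated objective: alternative
-- what changed: Instead of scanning all N*M matrix cells and testing dict membership per cell, B filters the index map once into the in-bounds row keys and column keys and writes only those mapped cells; same cost when the map covers most indices, fewer operations when it is sparse.
import Mathlib
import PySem

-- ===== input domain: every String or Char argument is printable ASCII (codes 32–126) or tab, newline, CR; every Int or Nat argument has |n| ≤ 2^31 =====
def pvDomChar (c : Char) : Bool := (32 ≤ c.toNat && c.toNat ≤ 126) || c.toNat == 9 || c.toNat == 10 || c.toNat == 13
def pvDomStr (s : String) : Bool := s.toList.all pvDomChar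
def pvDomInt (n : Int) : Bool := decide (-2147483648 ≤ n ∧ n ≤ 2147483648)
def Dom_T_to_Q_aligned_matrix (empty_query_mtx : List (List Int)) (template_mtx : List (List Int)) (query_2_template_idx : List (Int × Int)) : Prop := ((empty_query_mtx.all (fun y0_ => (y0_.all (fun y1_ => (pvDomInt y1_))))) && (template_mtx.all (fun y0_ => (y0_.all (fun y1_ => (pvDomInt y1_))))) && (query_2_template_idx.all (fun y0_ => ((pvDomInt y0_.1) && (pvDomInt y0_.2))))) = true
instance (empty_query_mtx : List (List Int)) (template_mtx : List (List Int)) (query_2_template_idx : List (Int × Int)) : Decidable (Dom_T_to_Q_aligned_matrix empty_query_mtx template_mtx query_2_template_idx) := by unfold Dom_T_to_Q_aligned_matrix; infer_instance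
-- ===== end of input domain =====

-- B replaces A's scan of all N*M cells (dict-membership test per cell) by iterating only over the
-- in-bounds mapped key pairs (objective: alternative traversal, same result; both mutate
-- empty_query_mtx in place in Python, the equivalence proved here is about the returned matrix).


-- ===== PORT A =====
-- template_mtx[d[i]][d[j]] : pyGet? is exact Python indexing (negative from the end, none = IndexError);
-- the '.getD …' defaults are never reached under Pre_ (which excludes the IndexError inputs).
def pvTval (template_mtx : List (List Int)) (ti tj : Int) : Int :=
  (PySem.List.pyGet? ((PySem.List.pyGet? template_mtx ti).getD []) tj).getD 0

-- body of A's inner loop: 'if i in d and j in d: query_mtx[i][j] = template_mtx[d[i]][d[j]]'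
-- (i, j come from range() so they are ≥ 0 and .toNat is exact).
def T2Q_inner_step (template_mtx : List (List Int)) (query_2_template_idx : List (Int × Int)) (i : Int) (mtx : List (List Int)) (j : Int) : List (List Int) :=
  match (PySem.Dict.mk query_2_template_idx).get? i, (PySem.Dict.mk query_2_template_idx).get? j with
  | some template_row_idx, some template_col_idx =>
      mtx.set i.toNat ((mtx.getD i.toNat []).set j.toNat (pvTval template_mtx template_row_idx template_col_idx))
  | _, _ => mtx

-- body of A's outer loop: 'for j in range(len(query_mtx[0])): …'
def T2Q_outer_step (template_mtx : List (List Int)) (query_2_template_idx : List (Int × Int)) (mtx : List (List Int)) (i : Int) : List (List Int) :=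
  (PySem.List.pyRange 0 (((mtx.headD []).length : Int)) 1).foldl (T2Q_inner_step template_mtx query_2_template_idx i) mtx

-- Literal port of A: 'for i in range(len(query_mtx)): …' over the state query_mtx (= empty_query_mtx).
def T_to_Q_aligned_matrix (empty_query_mtx : List (List Int)) (template_mtx : List (List Int)) (query_2_template_idx : List (Int × Int)) : List (List Int) :=
  (PySem.List.pyRange 0 (empty_query_mtx.length : Int) 1).foldl (T2Q_outer_step template_mtx query_2_template_idx) empty_query_mtx

-- ===== PORT B =====
-- body of B's inner loop: 'row[qj] = template_mtx[ti][tj]' (row is query_mtx[qi]; keys from the filtered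
-- lists are ≥ 0 so .toNat is exact).
def T2Q_alt_row_write (template_mtx : List (List Int)) (p : Int × Int) (mtx : List (List Int)) (q : Int × Int) : List (List Int) :=
  mtx.set p.1.toNat ((mtx.getD p.1.toNat []).set q.1.toNat (pvTval template_mtx p.2 q.2))

-- body of B's outer loop: 'for qj, tj in col_keys: …'
def T2Q_alt_outer_step (template_mtx : List (List Int)) (col_keys : List (Int × Int)) (mtx : List (List Int)) (p : Int × Int) : List (List Int) :=
  col_keys.foldl (T2Q_alt_row_write template_mtx p) mtx

-- Literal port of Source B: filter the index map once into the in-bounds row keys / column keys and write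
-- only those cells.
def T_to_Q_aligned_matrix_alt (empty_query_mtx : List (List Int)) (template_mtx : List (List Int)) (query_2_template_idx : List (Int × Int)) : List (List Int) :=
  if empty_query_mtx.isEmpty then empty_query_mtx
  else
    let nrows : Int := empty_query_mtx.length
    let ncols : Int := (empty_query_mtx.headD []).length
    let row_keys := query_2_template_idx.filter (fun p => decide (0 ≤ p.1) && decide (p.1 < nrows))
    let col_keys := query_2_template_idx.filter (fun p => decide (0 ≤ p.1) && decide (p.1 < ncols))
    row_keys.foldl (T2Q_alt_outer_step template_mtx col_keys) empty_query_mtx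

-- ===== PRECONDITION & SPEC =====
-- Pre_ excludes (a) association lists with duplicate keys — such inputs are not representable by a
-- Python dict (whose keys are unique), so nothing is thrown away at the Python level — and (b) the
-- inputs on which A raises IndexError: for a written cell (p.1, q.1), a mapped template row/column
-- index out of Python range, or a column index beyond the end of the (ragged) query row p.1.
def Pre_T_to_Q_aligned_matrix (empty_query_mtx : List (List Int)) (template_mtx : List (List Int)) (query_2_template_idx : List (Int × Int)) : Prop :=
  (query_2_template_idx.map Prod.fst).Nodup ∧
  ∀ p ∈ query_2_template_idx, ∀ q ∈ query_2_template_idx,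
    0 ≤ p.1 → p.1 < (empty_query_mtx.length : Int) →
    0 ≤ q.1 → q.1 < ((empty_query_mtx.headD []).length : Int) →
      PySem.Raise.InRange template_mtx.length p.2 ∧
      PySem.Raise.InRange ((PySem.List.pyGet? template_mtx p.2).getD []).length q.2 ∧
      q.1 < ((empty_query_mtx.getD p.1.toNat []).length : Int)
instance (empty_query_mtx : List (List Int)) (template_mtx : List (List Int)) (query_2_template_idx : List (Int × Int)) : Decidable (Pre_T_to_Q_aligned_matrix empty_query_mtx template_mtx query_2_template_idx) := by unfold Pre_T_to_Q_aligned_matrix; infer_instance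

def pvWitness_T_to_Q_aligned_matrix : List (List Int) × List (List Int) × (List (Int × Int)) :=
  ([[0, 0, 0], [0, 0, 0], [0, 0, 0]], [[1, 2], [3, 4]], [(0, 1), (2, 0)])

def Spec_T_to_Q_aligned_matrix (empty_query_mtx : List (List Int)) (template_mtx : List (List Int)) (query_2_template_idx : List (Int × Int)) (out : List (List Int)) : Prop := out = T_to_Q_aligned_matrix_alt empty_query_mtx template_mtx query_2_template_idx
instance (empty_query_mtx : List (List Int)) (template_mtx : List (List Int)) (query_2_template_idx : List (Int × Int)) (out : List (List Int)) : Decidable (Spec_T_to_Q_aligned_matrix empty_query_mtx template_mtx query_2_template_idx out) := by unfold Spec_T_to_Q_aligned_matrix; infer_instance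

-- ===== CLAIM (what is proved, stated in full; the proofs are below) =====
def Claim_equal_T_to_Q_aligned_matrix : Prop := ∀ (empty_query_mtx : List (List Int)) (template_mtx : List (List Int)) (query_2_template_idx : List (Int × Int)), Dom_T_to_Q_aligned_matrix empty_query_mtx template_mtx query_2_template_idx → Pre_T_to_Q_aligned_matrix empty_query_mtx template_mtx query_2_template_idx → Spec_T_to_Q_aligned_matrix empty_query_mtx template_mtx query_2_template_idx (T_to_Q_aligned_matrix empty_query_mtx template_mtx query_2_template_idx)

-- ===== LEMMAS AND PROOFS =====

-- generic machinery: a fold of "write one position of a list" steps, described by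
-- w j = some (position, function of the old entry) | none (no write)

def pvWStep {ι α : Type} (w : ι → Option (Nat × (α → α))) (dflt : α) (r : List α) (j : ι) : List α :=
  match w j with
  | some (p, f) => r.set p (f (r.getD p dflt))
  | none => r

def pvLook {ι α : Type} (w : ι → Option (Nat × (α → α))) (js : List ι) (q : Nat) : Option (α → α) :=
  js.findSome? (fun j => match w j with
    | some (p, f) => if p = q then some f else none
    | none => none)

theorem pv_set_getD_self {α : Type} (l : List α) (p : Nat) (d : α) : l.set p (l.getD p d) = l := by
  induction l generalizing p with
  | nil => simp
  | cons x xs ih =>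
    cases p with
    | zero => simp
    | succ n => simp only [List.set_cons_succ, List.getD_cons_succ, ih]

theorem pvLook_nil {ι α : Type} (w : ι → Option (Nat × (α → α))) (q : Nat) : pvLook w [] q = none := rfl

theorem pvLook_cons {ι α : Type} (w : ι → Option (Nat × (α → α))) (j : ι) (js : List ι) (q : Nat) :
    pvLook w (j :: js) q =
      (match w j with
       | some (p, f) => if p = q then some f else pvLook w js q
       | none => pvLook w js q) := by
  rcases hw : w j with _ | ⟨p, f⟩
  · simp [pvLook, hw]
  · by_cases hp : p = q
    · simp [pvLook, hw, hp]
    · simp [pvLook, hw, hp]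

theorem pvLook_eq_none {ι α : Type} (w : ι → Option (Nat × (α → α))) (js : List ι) (q : Nat)
    (h : q ∉ js.filterMap (fun j => (w j).map Prod.fst)) : pvLook w js q = none := by
  induction js with
  | nil => rfl
  | cons j js ih =>
    rw [pvLook_cons]
    simp only [List.mem_filterMap] at h
    push Not at h
    have htail : q ∉ js.filterMap (fun j => (w j).map Prod.fst) := by
      simp only [List.mem_filterMap]; push Not
      exact fun a ha => h a (List.mem_cons_of_mem _ ha)
    rcases hw : w j with _ | ⟨p, f⟩
    · exact ih htail
    · have hne : p ≠ q := by
        intro hp; exact (h j (List.mem_cons_self ..)) (by simp [hw, hp])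
      simp only [if_neg hne]
      exact ih htail

theorem pvWFold_getElem? {ι α : Type} (w : ι → Option (Nat × (α → α))) (dflt : α) (js : List ι)
    (r : List α) (q : Nat)
    (hnd : (js.filterMap (fun j => (w j).map Prod.fst)).Nodup) :
    (js.foldl (pvWStep w dflt) r)[q]? =
      match pvLook w js q with
      | some f => if q < r.length then some (f (r.getD q dflt)) else none
      | none => r[q]? := by
  induction js generalizing r with
  | nil => simp [pvLook_nil]
  | cons j js ih =>
    rw [List.foldl_cons, pvLook_cons]
    rcases hw : w j with _ | ⟨p, f⟩
    · have : pvWStep w dflt r j = r := by unfold pvWStep; rw [hw]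
      rw [this]
      exact ih r (by simpa [hw] using hnd)
    · have hstep : pvWStep w dflt r j = r.set p (f (r.getD p dflt)) := by unfold pvWStep; rw [hw]
      rw [hstep]
      have hnd' : (p :: js.filterMap (fun j => (w j).map Prod.fst)).Nodup := by
        simpa [List.filterMap_cons, hw] using hnd
      have hnotin := (List.nodup_cons.mp hnd').1
      have hndtail := (List.nodup_cons.mp hnd').2
      by_cases hp : p = q
      · subst hp
        have hnone : pvLook w js p = none := pvLook_eq_none w js p hnotin
        rw [ih _ hndtail, hnone]
        by_cases hq : p < r.length
        · simp [hq]
        · rw [List.set_eq_of_length_le (by omega)]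
          simp only [if_neg hq]
          exact List.getElem?_eq_none (by omega)
      · rw [ih _ hndtail]
        have hlen : (r.set p (f (r.getD p dflt))).length = r.length := by simp
        have hget : (r.set p (f (r.getD p dflt)))[q]? = r[q]? := List.getElem?_set_ne hp
        have hgetD : (r.set p (f (r.getD p dflt))).getD q dflt = r.getD q dflt := by
          simp only [List.getD_eq_getElem?_getD, List.getElem?_set_ne hp]
        simp only [if_neg hp, hlen, hget, hgetD]

-- hoisting: a fold that only rewrites position p of the outer list is a single set of position p
theorem pvHoist {ι β : Type} (js : List ι) (g : β → ι → β) (p : Nat) (d0 : β) (m : List β) :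
    js.foldl (fun m j => m.set p (g (m.getD p d0) j)) m = m.set p (js.foldl g (m.getD p d0)) := by
  induction js generalizing m with
  | nil => exact (pv_set_getD_self m p d0).symm
  | cons j js ih =>
    rw [List.foldl_cons, List.foldl_cons, ih]
    by_cases hp : p < m.length
    · rw [List.set_set]
      congr 2
      rw [List.getD_eq_getElem?_getD, List.getElem?_set_self hp]
      simp [List.getD_eq_getElem?_getD]
    · have hm : m.set p (g (m.getD p d0) j) = m := List.set_eq_of_length_le (by omega)
      rw [hm, List.set_eq_of_length_le (by omega), List.set_eq_of_length_le (by omega)]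

-- descriptions of the two ports' loops in pvWStep form

def pvRowStepA (template_mtx : List (List Int)) (d : List (Int × Int)) (i : Int) (r : List Int) (j : Int) : List Int :=
  match (PySem.Dict.mk d).get? i, (PySem.Dict.mk d).get? j with
  | some ti, some tj => r.set j.toNat (pvTval template_mtx ti tj)
  | _, _ => r

def pvRowA (template_mtx : List (List Int)) (d : List (Int × Int)) (m0 : Nat) (i : Int) (r : List Int) : List Int :=
  (PySem.List.pyRange 0 (m0 : Int) 1).foldl (pvRowStepA template_mtx d i) r

def pvWOutA (template_mtx : List (List Int)) (d : List (Int × Int)) (m0 : Nat) : Int → Option (Nat × (List Int → List Int)) :=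
  fun i => some (i.toNat, pvRowA template_mtx d m0 i)

def pvRowB (template_mtx : List (List Int)) (col_keys : List (Int × Int)) (ti : Int) (r : List Int) : List Int :=
  col_keys.foldl (fun r q => r.set q.1.toNat (pvTval template_mtx ti q.2)) r

def pvWOutB (template_mtx : List (List Int)) (col_keys : List (Int × Int)) : (Int × Int) → Option (Nat × (List Int → List Int)) :=
  fun p => some (p.1.toNat, pvRowB template_mtx col_keys p.2)

def pvWInA (template_mtx : List (List Int)) (d : List (Int × Int)) (ti : Int) : Int → Option (Nat × (Int → Int)) :=
  fun j => ((PySem.Dict.mk d).get? j).map (fun tj => (j.toNat, fun _ => pvTval template_mtx ti tj))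

def pvWInB (template_mtx : List (List Int)) (ti : Int) : (Int × Int) → Option (Nat × (Int → Int)) :=
  fun q => some (q.1.toNat, fun _ => pvTval template_mtx ti q.2)

theorem pv_inner_step_eq (tm : List (List Int)) (d : List (Int × Int)) (i : Int) (mtx : List (List Int)) (j : Int) :
    T2Q_inner_step tm d i mtx j = mtx.set i.toNat (pvRowStepA tm d i (mtx.getD i.toNat []) j) := by
  unfold T2Q_inner_step pvRowStepA
  cases h1 : (PySem.Dict.mk d).get? i <;> cases h2 : (PySem.Dict.mk d).get? j <;>
    first
      | exact (pv_set_getD_self mtx i.toNat []).symm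
      | rfl

theorem pvRowStepA_length (tm : List (List Int)) (d : List (Int × Int)) (i : Int) (r : List Int) (j : Int) :
    (pvRowStepA tm d i r j).length = r.length := by
  unfold pvRowStepA
  cases h1 : (PySem.Dict.mk d).get? i <;> cases h2 : (PySem.Dict.mk d).get? j <;> simp

theorem pvRowA_length (tm : List (List Int)) (d : List (Int × Int)) (m0 : Nat) (i : Int) (r : List Int) :
    (pvRowA tm d m0 i r).length = r.length := by
  unfold pvRowA
  generalize PySem.List.pyRange 0 (m0 : Int) 1 = js
  induction js generalizing r with
  | nil => rfl
  | cons j js ih => rw [List.foldl_cons]; rw [ih]; exact pvRowStepA_length tm d i r j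

theorem pv_getD_map_length (l : List (List Int)) (p : Nat) :
    (l.map List.length).getD p 0 = (l.getD p []).length := by
  simp only [List.getD_eq_getElem?_getD, List.getElem?_map]
  cases l[p]? <;> simp

theorem pv_headD_length (l : List (List Int)) : (l.headD []).length = (l.map List.length).headD 0 := by
  cases l <;> simp

theorem pv_outer_step_eq (tm : List (List Int)) (d : List (Int × Int)) (m0 : Nat)
    (mtx : List (List Int)) (i : Int) (hm : (mtx.headD []).length = m0) :
    T2Q_outer_step tm d mtx i = pvWStep (pvWOutA tm d m0) [] mtx i := by
  unfold T2Q_outer_step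
  rw [hm]
  rw [show (T2Q_inner_step tm d i)
        = fun mtx j => mtx.set i.toNat (pvRowStepA tm d i (mtx.getD i.toNat []) j) from
      funext fun mtx => funext fun j => pv_inner_step_eq tm d i mtx j]
  rw [pvHoist]
  rfl

theorem pv_stepA_mapLength (tm : List (List Int)) (d : List (Int × Int)) (m0 : Nat)
    (mtx : List (List Int)) (i : Int) :
    ((pvWStep (pvWOutA tm d m0) [] mtx i).map List.length) = mtx.map List.length := by
  show ((mtx.set i.toNat (pvRowA tm d m0 i (mtx.getD i.toNat []))).map List.length) = _
  rw [List.map_set, pvRowA_length, ← pv_getD_map_length]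
  exact pv_set_getD_self ..

theorem pv_portA_eq (e tm : List (List Int)) (d : List (Int × Int)) :
    T_to_Q_aligned_matrix e tm d
      = (PySem.List.pyRange 0 (e.length : Int) 1).foldl
          (pvWStep (pvWOutA tm d (e.headD []).length) []) e := by
  unfold T_to_Q_aligned_matrix
  have main : ∀ (js : List Int) (mtx : List (List Int)), mtx.map List.length = e.map List.length →
      js.foldl (T2Q_outer_step tm d) mtx
        = js.foldl (pvWStep (pvWOutA tm d (e.headD []).length) []) mtx := by
    intro js
    induction js with
    | nil => intro mtx _; rfl
    | cons i js ih =>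
      intro mtx hm
      rw [List.foldl_cons, List.foldl_cons,
          pv_outer_step_eq tm d _ mtx i (by rw [pv_headD_length, hm, ← pv_headD_length]),
          ih _ (by rw [pv_stepA_mapLength, hm])]
  exact main _ e rfl

theorem pv_altOuter_eq (tm : List (List Int)) (ck : List (Int × Int)) (mtx : List (List Int)) (p : Int × Int) :
    T2Q_alt_outer_step tm ck mtx p = pvWStep (pvWOutB tm ck) [] mtx p := by
  show ck.foldl (fun m q => m.set p.1.toNat
      ((fun r (q : Int × Int) => r.set q.1.toNat (pvTval tm p.2 q.2)) (m.getD p.1.toNat []) q)) mtx = _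
  exact pvHoist ck (fun r (q : Int × Int) => r.set q.1.toNat (pvTval tm p.2 q.2)) p.1.toNat [] mtx

theorem pv_portB_eq (e tm : List (List Int)) (d : List (Int × Int)) (he : e ≠ []) :
    T_to_Q_aligned_matrix_alt e tm d
      = (d.filter (fun p => decide (0 ≤ p.1) && decide (p.1 < (e.length : Int)))).foldl
          (pvWStep (pvWOutB tm
            (d.filter (fun p => decide (0 ≤ p.1) && decide (p.1 < (((e.headD []).length : Nat) : Int))))) []) e := by
  unfold T_to_Q_aligned_matrix_alt
  rw [if_neg (by simpa using he)]
  show (d.filter (fun p => decide (0 ≤ p.1) && decide (p.1 < (e.length : Int)))).foldl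
      (T2Q_alt_outer_step tm
        (d.filter (fun p => decide (0 ≤ p.1) && decide (p.1 < (((e.headD []).length : Nat) : Int))))) e = _
  rw [show (T2Q_alt_outer_step tm
        (d.filter (fun p => decide (0 ≤ p.1) && decide (p.1 < (((e.headD []).length : Nat) : Int)))))
      = pvWStep (pvWOutB tm
        (d.filter (fun p => decide (0 ≤ p.1) && decide (p.1 < (((e.headD []).length : Nat) : Int))))) [] from
    funext fun mtx => funext fun p => pv_altOuter_eq tm _ mtx p]

theorem pvRowA_id (tm : List (List Int)) (d : List (Int × Int)) (m0 : Nat) (i : Int) (r : List Int)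
    (h : (PySem.Dict.mk d).get? i = none) : pvRowA tm d m0 i r = r := by
  unfold pvRowA
  generalize PySem.List.pyRange 0 (m0 : Int) 1 = js
  induction js generalizing r with
  | nil => rfl
  | cons j js ih =>
    rw [List.foldl_cons, show pvRowStepA tm d i r j = r from by unfold pvRowStepA; rw [h]]
    exact ih r

theorem pvRowStepA_some (tm : List (List Int)) (d : List (Int × Int)) (i ti : Int)
    (h : (PySem.Dict.mk d).get? i = some ti) :
    pvRowStepA tm d i = pvWStep (pvWInA tm d ti) 0 := by
  funext r j
  unfold pvRowStepA pvWStep pvWInA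
  rw [h]
  cases hj : (PySem.Dict.mk d).get? j <;> simp

theorem pvLook_range {α : Type} (W : Int → Option (α → α)) (a n : Int) (ha : 0 ≤ a) (q : Nat) :
    pvLook (fun j => (W j).map (fun f => (j.toNat, f))) (PySem.List.pyRange a n 1) q
      = if a ≤ (q : Int) ∧ (q : Int) < n then W q else none := by
  induction hk : (n - a).toNat generalizing a with
  | zero =>
    rw [PySem.List.pyRange_one_eq_nil (by omega), pvLook_nil, if_neg (by omega)]
  | succ k ih =>
    rw [PySem.List.pyRange_one_cons (by omega), pvLook_cons]
    rcases hW : W a with _ | f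
    · simp only [Option.map_none]
      rw [ih (a + 1) (by omega) (by omega)]
      by_cases hq : (q : Int) = a
      · rw [if_neg (by omega), if_pos (by omega), hq, hW]
      · rw [if_congr (show ((a + 1 ≤ (q : Int) ∧ (q : Int) < n)) ↔ ((a ≤ (q : Int) ∧ (q : Int) < n))
            from by omega) rfl rfl]
    · simp only [Option.map_some]
      by_cases hq : a.toNat = q
      · rw [if_pos hq, if_pos (by omega), show ((q : Int)) = a from by omega, hW]
      · rw [if_neg hq, ih (a + 1) (by omega) (by omega)]
        have hqa : (q : Int) ≠ a := by omega
        rw [if_congr (show ((a + 1 ≤ (q : Int) ∧ (q : Int) < n)) ↔ ((a ≤ (q : Int) ∧ (q : Int) < n))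
            from by omega) rfl rfl]

theorem pvLook_filterKeys {α : Type} (F : Int → α → α) (d : List (Int × Int)) (n : Int) (q : Nat) :
    pvLook (fun p => some (p.1.toNat, F p.2)) (d.filter (fun p => decide (0 ≤ p.1) && decide (p.1 < n))) q
      = if (q : Int) < n then ((PySem.Dict.mk d).get? (q : Int)).map F else none := by
  induction d with
  | nil =>
    simp only [List.filter_nil, pvLook_nil]
    split <;> rfl
  | cons kv rest ih =>
    obtain ⟨k, v⟩ := kv
    simp only [List.filter_cons]
    rw [PySem.Dict.get?_mk_cons]
    by_cases hk : k = (q : Int)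
    · subst hk
      simp only [beq_self_eq_true, if_pos]
      by_cases hn : ((q : Int)) < n
      · rw [if_pos (by simp only [Bool.and_eq_true, decide_eq_true_eq]; exact ⟨by omega, hn⟩), pvLook_cons]
        simp only [Int.toNat_natCast]
        rw [if_pos hn]
        rfl
      · rw [if_neg (by simp only [Bool.and_eq_true, decide_eq_true_eq]; omega), if_neg hn]
        apply pvLook_eq_none
        intro hmem
        simp only [List.mem_filterMap, Option.map_some, Option.some.injEq, List.mem_filter] at hmem
        obtain ⟨p, ⟨_, hpf⟩, hpq⟩ := hmem
        simp only [Bool.and_eq_true, decide_eq_true_eq] at hpf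
        omega
    · simp only [show (k == (q : Int)) = false from by simpa using hk, Bool.false_eq_true,
        if_false]
      cases hf : (decide (0 ≤ k) && decide (k < n)) with
      | false => rw [if_neg (by simp)]; exact ih
      | true =>
        rw [if_pos rfl, pvLook_cons]
        have h0 : 0 ≤ k := by
          simp only [Bool.and_eq_true, decide_eq_true_eq] at hf; exact hf.1
        have hne : k.toNat ≠ q := fun h => hk (by omega)
        simp only [if_neg hne]
        exact ih

theorem pv_filterMap_pos_sublist {ι α : Type} (js : List ι) (w : ι → Option (Nat × (α → α))) (g : ι → Nat)
    (h : ∀ j, w j = none ∨ (w j).map Prod.fst = some (g j)) :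
    (js.filterMap (fun j => (w j).map Prod.fst)).Sublist (js.map g) := by
  induction js with
  | nil => simp
  | cons j js ih =>
    rw [List.filterMap_cons, List.map_cons]
    rcases hw : w j with _ | ⟨p, f⟩
    · exact ih.cons _
    · rcases h j with hj | hj
      · rw [hw] at hj; exact absurd hj (by simp)
      · rw [hw] at hj
        simp only [Option.map_some, Option.some.injEq] at hj
        simp only [Option.map_some]
        rw [show p = g j from hj]
        exact ih.cons₂ _

theorem pv_nodup_range_toNat (n : Int) : ((PySem.List.pyRange 0 n 1).map Int.toNat).Nodup := by
  apply (PySem.List.nodup_pyRange_one ..).map_on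
  intro x hx y hy hxy
  rw [PySem.List.mem_pyRange_one] at hx hy
  omega

theorem pv_nodup_filter_toNat (d : List (Int × Int)) (n : Int) (hnd : (d.map Prod.fst).Nodup) :
    ((d.filter (fun p => decide (0 ≤ p.1) && decide (p.1 < n))).map (fun p => p.1.toNat)).Nodup := by
  have hnd2 : ((d.filter (fun p => decide (0 ≤ p.1) && decide (p.1 < n))).map Prod.fst).Nodup :=
    (List.Sublist.map Prod.fst List.filter_sublist).nodup hnd
  rw [show ((d.filter (fun p => decide (0 ≤ p.1) && decide (p.1 < n))).map (fun p => p.1.toNat))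
      = ((d.filter (fun p => decide (0 ≤ p.1) && decide (p.1 < n))).map Prod.fst).map Int.toNat from by
    rw [List.map_map]; rfl]
  apply hnd2.map_on
  intro x hx y hy hxy
  simp only [List.mem_map, List.mem_filter, Bool.and_eq_true, decide_eq_true_eq] at hx hy
  obtain ⟨p, ⟨_, hpf⟩, rfl⟩ := hx
  obtain ⟨r, ⟨_, hrf⟩, rfl⟩ := hy
  omega

theorem pv_row_eq (tm : List (List Int)) (d : List (Int × Int)) (hnd : (d.map Prod.fst).Nodup)
    (m0 : Nat) (i ti : Int) (hti : (PySem.Dict.mk d).get? i = some ti) (r : List Int) :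
    pvRowA tm d m0 i r
      = pvRowB tm (d.filter (fun p => decide (0 ≤ p.1) && decide (p.1 < (m0 : Int)))) ti r := by
  have hndA : (((PySem.List.pyRange 0 (m0 : Int) 1)).filterMap
      (fun j => ((pvWInA tm d ti) j).map Prod.fst)).Nodup := by
    refine ((pv_filterMap_pos_sublist _ _ Int.toNat ?_).nodup (pv_nodup_range_toNat (m0 : Int)))
    intro j
    unfold pvWInA
    cases (PySem.Dict.mk d).get? j
    · exact Or.inl rfl
    · exact Or.inr rfl
  have hndB : (((d.filter (fun p => decide (0 ≤ p.1) && decide (p.1 < (m0 : Int))))).filterMap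
      (fun p => ((pvWInB tm ti) p).map Prod.fst)).Nodup := by
    refine ((pv_filterMap_pos_sublist _ _ (fun p => p.1.toNat) ?_).nodup
      (pv_nodup_filter_toNat d (m0 : Int) hnd))
    intro p
    exact Or.inr rfl
  have hA : pvRowA tm d m0 i r = (PySem.List.pyRange 0 (m0 : Int) 1).foldl (pvWStep (pvWInA tm d ti) 0) r := by
    unfold pvRowA; rw [pvRowStepA_some tm d i ti hti]
  have hB : pvRowB tm (d.filter (fun p => decide (0 ≤ p.1) && decide (p.1 < (m0 : Int)))) ti r
      = (d.filter (fun p => decide (0 ≤ p.1) && decide (p.1 < (m0 : Int)))).foldl (pvWStep (pvWInB tm ti) 0) r := rfl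
  apply List.ext_getElem?
  intro q
  rw [hA, hB, pvWFold_getElem? _ _ _ _ _ hndA, pvWFold_getElem? _ _ _ _ _ hndB]
  have hLA : pvLook (pvWInA tm d ti) (PySem.List.pyRange 0 (m0 : Int) 1) q
      = if 0 ≤ (q : Int) ∧ (q : Int) < (m0 : Int)
        then ((PySem.Dict.mk d).get? (q : Int)).map (fun tj (_ : Int) => pvTval tm ti tj) else none := by
    rw [show (pvWInA tm d ti)
          = fun j => ((((PySem.Dict.mk d).get? j).map (fun tj (_ : Int) => pvTval tm ti tj)).map
              (fun f => (j.toNat, f))) from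
        funext fun j => by unfold pvWInA; cases (PySem.Dict.mk d).get? j <;> simp]
    exact pvLook_range _ 0 (m0 : Int) le_rfl q
  have hLB : pvLook (pvWInB tm ti) (d.filter (fun p => decide (0 ≤ p.1) && decide (p.1 < (m0 : Int)))) q
      = if (q : Int) < (m0 : Int)
        then ((PySem.Dict.mk d).get? (q : Int)).map (fun tj (_ : Int) => pvTval tm ti tj) else none :=
    pvLook_filterKeys (fun tj (_ : Int) => pvTval tm ti tj) d (m0 : Int) q
  rw [hLA, hLB,
    if_congr (show (0 ≤ (q : Int) ∧ (q : Int) < (m0 : Int)) ↔ ((q : Int) < (m0 : Int)) from by omega)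
      rfl rfl]

-- ===== VERDICT (by name: the statement is the Claim_ definition above) =====
theorem T_to_Q_aligned_matrix_spec : Claim_equal_T_to_Q_aligned_matrix := by
  intro e tm d _ hpre
  obtain ⟨hnd, -⟩ := hpre
  unfold Spec_T_to_Q_aligned_matrix
  by_cases he : e = []
  · subst he
    unfold T_to_Q_aligned_matrix T_to_Q_aligned_matrix_alt
    rw [PySem.List.pyRange_one_eq_nil (by simp)]
    simp
  · rw [pv_portA_eq, pv_portB_eq e tm d he]
    have hndA : ((PySem.List.pyRange 0 (e.length : Int) 1).filterMap
        (fun i => ((pvWOutA tm d (e.headD []).length) i).map Prod.fst)).Nodup := by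
      refine (pv_filterMap_pos_sublist _ _ Int.toNat ?_).nodup (pv_nodup_range_toNat _)
      intro i; exact Or.inr rfl
    have hndB : ((d.filter (fun p => decide (0 ≤ p.1) && decide (p.1 < (e.length : Int)))).filterMap
        (fun p => ((pvWOutB tm (d.filter (fun p => decide (0 ≤ p.1) &&
          decide (p.1 < (((e.headD []).length : Nat) : Int))))) p).map Prod.fst)).Nodup := by
      refine (pv_filterMap_pos_sublist _ _ (fun p => p.1.toNat) ?_).nodup
        (pv_nodup_filter_toNat d (e.length : Int) hnd)
      intro p; exact Or.inr rfl
    apply List.ext_getElem?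
    intro q
    rw [pvWFold_getElem? _ _ _ _ _ hndA, pvWFold_getElem? _ _ _ _ _ hndB]
    have hLA : pvLook (pvWOutA tm d (e.headD []).length) (PySem.List.pyRange 0 (e.length : Int) 1) q
        = if 0 ≤ (q : Int) ∧ (q : Int) < (e.length : Int)
          then some (pvRowA tm d (e.headD []).length (q : Int)) else none := by
      rw [show (pvWOutA tm d (e.headD []).length)
            = fun i => ((some (pvRowA tm d (e.headD []).length i)).map (fun f => (i.toNat, f))) from rfl]
      exact pvLook_range _ 0 (e.length : Int) le_rfl q
    have hLB : pvLook (pvWOutB tm (d.filter (fun p => decide (0 ≤ p.1) &&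
          decide (p.1 < (((e.headD []).length : Nat) : Int)))))
          (d.filter (fun p => decide (0 ≤ p.1) && decide (p.1 < (e.length : Int)))) q
        = if (q : Int) < (e.length : Int)
          then ((PySem.Dict.mk d).get? (q : Int)).map
            (pvRowB tm (d.filter (fun p => decide (0 ≤ p.1) &&
              decide (p.1 < (((e.headD []).length : Nat) : Int))))) else none :=
      pvLook_filterKeys _ d (e.length : Int) q
    rw [hLA, hLB, if_congr (show (0 ≤ (q : Int) ∧ (q : Int) < (e.length : Int))
        ↔ ((q : Int) < (e.length : Int)) from by omega) rfl rfl]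
    by_cases hq : (q : Int) < (e.length : Int)
    · rw [if_pos hq, if_pos hq]
      cases hget : (PySem.Dict.mk d).get? (q : Int) with
      | none =>
        show (if q < e.length then some (pvRowA tm d (e.headD []).length (q : Int) (e.getD q [])) else none)
          = e[q]?
        have hq' : q < e.length := by omega
        rw [pvRowA_id tm d _ (q : Int) _ hget, if_pos hq',
            List.getD_eq_getElem?_getD, List.getElem?_eq_getElem hq']
        rfl
      | some ti =>
        show (if q < e.length then some (pvRowA tm d (e.headD []).length (q : Int) (e.getD q [])) else none)
          = (if q < e.length then some (pvRowB tm (d.filter (fun p => decide (0 ≤ p.1) &&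
              decide (p.1 < (((e.headD []).length : Nat) : Int)))) ti (e.getD q [])) else none)
        rw [pv_row_eq tm d hnd (e.headD []).length (q : Int) ti hget]
    · rw [if_neg hq, if_neg hq]
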